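-- pv_equiv track=rewrite | github.com/patrick1238/Impro3000 | impro3000_1.1_beta/reader/parser_lib/batch_converter.py | identify_valuable_colums
-- ===== SOURCE A (Python) =====
-- def identify_valuable_colums(header):
--     columns = {"properties": [],"object_id": [], "stain": [], "image_name": [] }
--     header_single = header.split(",")
--     stopper = False
--     counter = 0
--     for head in header_single:
--         if head == "Unit":
--             stopper = True
--         elif not stopper:
--             columns["properties"].append(counter)
--         elif head == "OriginalID":
--             columns["object_id"].append(counter)
--         elif head == "Original Component Name":
--             columns["stain"].append(counter)
--         elif head == "Original Image Name":
--             columns["image_name"].append(counter)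
--         counter = counter + 1
--     return columns
-- ===== SOURCE B (Python) =====
-- def identify_valuable_colums(header):
--     header_single = header.split(",")
--     idx = header_single.index("Unit") if "Unit" in header_single else len(header_single)
--     columns = {"properties": list(range(idx)),
--                "object_id": [], "stain": [], "image_name": []}
--     mapping = {"OriginalID": "object_id",
--                "Original Component Name": "stain",
--                "Original Image Name": "image_name"}
--     for i, head in enumerate(header_single[idx + 1:], idx + 1):
--         key = mapping.get(head)
--         if key is not None:
--             columns[key].append(i)
--     return columns
-- ===== Notes on version B (the rewrite author's own statement) =====
-- stated objective: simpler
-- what changed: Replaces A's single flag-driven scan with carried stopper/counter state by a two-phase decomposition: find the 'Unit' boundary once, emit the properties indices directly as a range, and scan only the tail after the boundary through a name-to-category mapping dict.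
import Mathlib
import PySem

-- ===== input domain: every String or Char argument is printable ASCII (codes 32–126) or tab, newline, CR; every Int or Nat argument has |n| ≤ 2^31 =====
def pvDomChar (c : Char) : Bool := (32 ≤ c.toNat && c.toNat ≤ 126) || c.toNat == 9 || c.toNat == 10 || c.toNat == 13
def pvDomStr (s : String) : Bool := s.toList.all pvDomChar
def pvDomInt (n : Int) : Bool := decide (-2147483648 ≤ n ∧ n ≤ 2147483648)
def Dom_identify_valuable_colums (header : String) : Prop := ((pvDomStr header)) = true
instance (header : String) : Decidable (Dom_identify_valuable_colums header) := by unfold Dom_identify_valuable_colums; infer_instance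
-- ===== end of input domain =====

-- B replaces A's single flag-driven scan by a two-phase decomposition: find the 'Unit'
-- boundary, emit properties as a range, and scan only the tail through a name→category map
-- (objective: simpler; same cost).

-- ===== PORT A =====
-- A's loop body (flag- and counter-carrying state), used by the fold in the port.
def stepA (st : PySem.Dict String (List Int) × Bool × Int) (head : String) :
    PySem.Dict String (List Int) × Bool × Int :=
  let columns := st.1
  let stopper := st.2.1
  let counter := st.2.2
  let p : PySem.Dict String (List Int) × Bool :=
    if head = "Unit" then (columns, true)
    else if stopper = false then (PySem.Dict.modify columns "properties" [] (· ++ [counter]), stopper)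
    else if head = "OriginalID" then (PySem.Dict.modify columns "object_id" [] (· ++ [counter]), stopper)
    else if head = "Original Component Name" then (PySem.Dict.modify columns "stain" [] (· ++ [counter]), stopper)
    else if head = "Original Image Name" then (PySem.Dict.modify columns "image_name" [] (· ++ [counter]), stopper)
    else (columns, stopper)
  (p.1, p.2, counter + 1)

def identify_valuable_colums (header : String) : List (String × List Int) :=
  let columns : PySem.Dict String (List Int) :=
    PySem.Dict.ofList [("properties", []), ("object_id", []), ("stain", []), ("image_name", [])]
  let header_single := (PySem.Str.split? header ",").getD []
  (header_single.foldl stepA (columns, false, 0)).1.items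

-- ===== PORT B =====
-- B's name→category mapping and tail-loop body.
def altMapping : PySem.Dict String String :=
  PySem.Dict.ofList [("OriginalID", "object_id"), ("Original Component Name", "stain"),
                     ("Original Image Name", "image_name")]

def stepB (columns : PySem.Dict String (List Int)) (p : Int × String) :
    PySem.Dict String (List Int) :=
  match PySem.Dict.get? altMapping p.2 with
  | some key => PySem.Dict.modify columns key [] (· ++ [p.1])
  | none => columns

def identify_valuable_colums_alt (header : String) : List (String × List Int) :=
  let header_single := (PySem.Str.split? header ",").getD []
  let idx : Int :=
    if "Unit" ∈ header_single then
      match PySem.List.index? header_single "Unit" with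
      | some k => (k : Int)
      | none => 0
    else (header_single.length : Int)
  let columns : PySem.Dict String (List Int) :=
    PySem.Dict.ofList [("properties", PySem.List.pyRange 0 idx 1), ("object_id", []),
                       ("stain", []), ("image_name", [])]
  ((PySem.List.enumerate (PySem.List.slice header_single (some (idx + 1)) none) (idx + 1)).foldl
      stepB columns).items

-- ===== PRECONDITION & SPEC =====
def Spec_identify_valuable_colums (header : String) (out : List (String × List Int)) : Prop := out = identify_valuable_colums_alt header
instance (header : String) (out : List (String × List Int)) : Decidable (Spec_identify_valuable_colums header out) := by unfold Spec_identify_valuable_colums; infer_instance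

-- ===== CLAIM (what is proved, stated in full; the proofs are below) =====
def Claim_equal_identify_valuable_colums : Prop := ∀ (header : String), Dom_identify_valuable_colums header → Spec_identify_valuable_colums header (identify_valuable_colums header)

-- ===== LEMMAS AND PROOFS =====

-- one A-step with the flag set equals one B-step (with the counter carried separately)
theorem stepA_true_eq_stepB (d : PySem.Dict String (List Int)) (c : Int) (x : String) :
    stepA (d, true, c) x = (stepB d (c, x), true, c + 1) := by
  have hit : altMapping.items = [("OriginalID", "object_id"), ("Original Component Name", "stain"),
      ("Original Image Name", "image_name")] := rfl
  by_cases h1 : x = "Unit"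
  · subst h1
    have h : PySem.Dict.get? altMapping "Unit" = none := rfl
    simp [stepA, stepB, h]
  · by_cases h2 : x = "OriginalID"
    · subst h2
      have h : PySem.Dict.get? altMapping "OriginalID" = some "object_id" := rfl
      simp [stepA, stepB, h, h1]
    · by_cases h3 : x = "Original Component Name"
      · subst h3
        have h : PySem.Dict.get? altMapping "Original Component Name" = some "stain" := rfl
        simp [stepA, stepB, h, h1, h2]
      · by_cases h4 : x = "Original Image Name"
        · subst h4
          have h : PySem.Dict.get? altMapping "Original Image Name" = some "image_name" := rfl
          simp [stepA, stepB, h, h1, h2, h3]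
        · have n2 : "OriginalID" ≠ x := fun h => h2 h.symm
          have n3 : "Original Component Name" ≠ x := fun h => h3 h.symm
          have n4 : "Original Image Name" ≠ x := fun h => h4 h.symm
          have h : PySem.Dict.get? altMapping x = none := by
            simp [PySem.Dict.get?, hit, n2, n3, n4]
          simp [stepA, stepB, h, h1, h2, h3, h4]

-- A's tail phase (flag set) is B's tail loop over the enumerated suffix
theorem foldl_stepA_true (hs : List String) :
    ∀ (d : PySem.Dict String (List Int)) (c : Int),
      hs.foldl stepA (d, true, c) =
        ((PySem.List.enumerate hs c).foldl stepB d, true, c + hs.length) := by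
  induction hs with
  | nil => intro d c; simp [PySem.List.enumerate]
  | cons x xs ih =>
    intro d c
    rw [List.foldl_cons, stepA_true_eq_stepB, ih, PySem.List.enumerate_cons, List.foldl_cons]
    refine Prod.ext rfl (Prod.ext rfl ?_)
    simp; omega

-- A's head phase (no "Unit" seen yet): every index is appended to "properties"
theorem foldl_stepA_false (hs : List String) (hu : "Unit" ∉ hs) :
    ∀ (c : Int) (ps a b cc : List Int),
      hs.foldl stepA
        (PySem.Dict.ofList [("properties", ps), ("object_id", a), ("stain", b), ("image_name", cc)],
          false, c) =
        (PySem.Dict.ofList [("properties", ps ++ PySem.List.pyRange c (c + hs.length) 1),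
          ("object_id", a), ("stain", b), ("image_name", cc)], false, c + hs.length) := by
  induction hs with
  | nil => intro c ps a b cc; simp
  | cons x xs ih =>
    intro c ps a b cc
    have hx : x ≠ "Unit" := fun h => hu (h ▸ List.mem_cons_self)
    have hxs : "Unit" ∉ xs := fun h => hu (List.mem_cons_of_mem _ h)
    rw [List.foldl_cons]
    have hstep : stepA
        (PySem.Dict.ofList [("properties", ps), ("object_id", a), ("stain", b), ("image_name", cc)],
          false, c) x =
        (PySem.Dict.ofList [("properties", ps ++ [c]), ("object_id", a), ("stain", b), ("image_name", cc)],
          false, c + 1) := by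
      simp [stepA, hx]; rfl
    rw [hstep, ih hxs]
    have hr : PySem.List.pyRange c (c + ((x :: xs).length : Int)) 1 =
        c :: PySem.List.pyRange (c + 1) (c + ((x :: xs).length : Int)) 1 :=
      PySem.List.pyRange_one_cons (by simp)
    refine Prod.ext ?_ (Prod.ext rfl ?_)
    · rw [hr]
      have h2 : (c + 1) + (xs.length : Int) = c + ((x :: xs).length : Int) := by simp; omega
      rw [h2]
      simp
    · simp only [List.length_cons]
      push_cast
      omega

-- ===== VERDICT (by name: the statement is the Claim_ definition above) =====
theorem identify_valuable_colums_spec : Claim_equal_identify_valuable_colums := by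
  intro header _
  unfold Spec_identify_valuable_colums identify_valuable_colums identify_valuable_colums_alt
  set hs := (PySem.Str.split? header ",").getD [] with hhs
  by_cases hmem : "Unit" ∈ hs
  · -- hs = pre ++ "Unit" :: post, "Unit" ∉ pre
    obtain ⟨k, hk⟩ := (PySem.List.index?_isSome_iff hs "Unit").2 hmem |> Option.isSome_iff_exists.1
    obtain ⟨pre, post, hdec, hlen, hnp⟩ := (PySem.List.index?_eq_some_iff hs "Unit" k).1 hk
    simp only [hmem, if_true, hk]
    rw [hdec, List.foldl_append, foldl_stepA_false pre hnp 0 [] [] [] []]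
    rw [List.foldl_cons]
    have hstepU : stepA
        (PySem.Dict.ofList [("properties", [] ++ PySem.List.pyRange 0 (0 + (pre.length : Int)) 1),
          ("object_id", []), ("stain", []), ("image_name", [])], false, 0 + (pre.length : Int)) "Unit" =
        (PySem.Dict.ofList [("properties", [] ++ PySem.List.pyRange 0 (0 + (pre.length : Int)) 1),
          ("object_id", []), ("stain", []), ("image_name", [])], true, 0 + (pre.length : Int) + 1) := by
      simp [stepA]
    rw [hstepU, foldl_stepA_true]
    have hslice : PySem.List.slice (pre ++ "Unit" :: post) (some ((k : Int) + 1)) none = post := by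
      rw [← hlen]
      have h1 : ((pre.length : Int) + 1) = ((pre.length + 1 : Nat) : Int) := by push_cast; ring
      rw [h1, PySem.List.slice_from_natCast]
      have h2 : pre ++ "Unit" :: post = (pre ++ ["Unit"]) ++ post := by simp
      have h3 : pre.length + 1 = (pre ++ ["Unit"]).length := by simp
      rw [h2, h3, List.drop_left]
    rw [hslice, ← hlen]
    simp
  · -- no "Unit": everything is a property, B's tail is empty
    simp only [hmem, if_false]
    rw [foldl_stepA_false hs hmem 0 [] [] [] []]
    have hslice : PySem.List.slice hs (some ((hs.length : Int) + 1)) none = [] := by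
      have : ((hs.length : Int) + 1) = ((hs.length + 1 : Nat) : Int) := by push_cast; ring
      rw [this, PySem.List.slice_from_natCast]
      simp
    rw [hslice]
    simp [PySem.List.enumerate]
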